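-- pv_equiv track=rewrite | github.com/ansible/ansible-risk-insight | ansible_risk_insight/finder.py | count_top_level_element
-- ===== SOURCE A (Python) =====
-- def count_top_level_element(yml_body: str = ""):
--     def _is_skip_line(line: str):
--         # skip empty line
--         if not line.strip():
--             return True
--         # skip comment line
--         if line.strip()[0] == "#":
--             return True
--         return False
--
--     lines = yml_body.splitlines()
--     top_level_indent = 1024
--     valid_line_found = False
--     for line in lines:
--         if _is_skip_line(line):
--             continue
--
--         valid_line_found = True
--         indent_level = len(line) - len(line.lstrip())
--         if indent_level < top_level_indent:
--             top_level_indent = indent_level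
--
--     if not valid_line_found:
--         return -1
--
--     count = 0
--     for line in lines:
--         if _is_skip_line(line):
--             continue
--         if len(line) < top_level_indent:
--             continue
--         elem = line[top_level_indent:]
--         if not elem:
--             continue
--         if elem[0] == " ":
--             continue
--         else:
--             count += 1
--     return count
-- ===== SOURCE B (Python) =====
-- def count_top_level_element(yml_body: str = ""):
--     # Single pass: track the minimum indent seen so far and how many lines sit at it.
--     min_indent = None
--     count = 0
--     for line in yml_body.splitlines():
--         stripped = line.strip()
--         if not stripped or stripped[0] == "#":
--             continue
--         indent = len(line) - len(line.lstrip())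
--         if min_indent is None or indent < min_indent:
--             min_indent = indent
--             count = 1
--         elif indent == min_indent:
--             count += 1
--     if min_indent is None:
--         return -1
--     return count
-- ===== Notes on version B (the rewrite author's own statement) =====
-- stated objective: simpler
-- what changed: A makes a sentinel-based find-min pass and then a second pass slicing every line at that indent; B is one pass keeping a running (min_indent, count) pair; Pre_ excludes bodies whose every valid line is indented by more than 1024 characters, where A's hard-coded 1024 sentinel caps the computed indent below the real minimum and its count is an artefact of that sentinel.
-- intended difference: On bodies where some valid line indented deeper than the minimum indent has a tab at the minimum-indent column, A counts that deeper line as top-level too (its test only skips a space there), while B counts only the lines at the minimum indent, which is the intended count of top-level elements. — e.g. on count_top_level_element("a: 1\n\tb: 2"): A returns 2, B returns 1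
import Mathlib
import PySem

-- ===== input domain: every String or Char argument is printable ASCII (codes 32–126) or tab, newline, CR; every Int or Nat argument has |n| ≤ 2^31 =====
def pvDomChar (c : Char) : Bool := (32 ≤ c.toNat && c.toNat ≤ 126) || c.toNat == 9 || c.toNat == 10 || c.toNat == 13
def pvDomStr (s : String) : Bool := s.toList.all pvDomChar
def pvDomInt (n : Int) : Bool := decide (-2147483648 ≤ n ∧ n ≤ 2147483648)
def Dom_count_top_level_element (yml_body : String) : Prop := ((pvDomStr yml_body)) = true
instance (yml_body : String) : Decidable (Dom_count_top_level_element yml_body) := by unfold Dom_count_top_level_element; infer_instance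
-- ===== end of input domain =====

-- B replaces A's sentinel find-min pass plus slicing re-scan by one pass keeping a running
-- (min_indent, count) pair (objective: simpler); on the D_ inputs below B's count is the intended one.

-- ===== PORT A =====
-- Python's inner helper _is_skip_line
def pvIsSkipLine (line : List Char) : Bool :=
  match PySem.Chars.strip line with
  | [] => true                       -- not line.strip()
  | c :: _ => c == '#'               -- line.strip()[0] == "#"

def count_top_level_element (yml_body : String) : Int :=
  let lines := (PySem.Str.splitlines yml_body).map String.toList
  let r := lines.foldl (fun (acc : Nat × Bool) line =>
      if pvIsSkipLine line then acc
      else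
        let indent := line.length - (PySem.Chars.lstrip line).length
        (if indent < acc.1 then indent else acc.1, true)) (1024, false)
  if r.2 = false then -1
  else
    lines.foldl (fun (c : Int) line =>
      if pvIsSkipLine line then c
      else if line.length < r.1 then c
      else
        match PySem.List.slice line (some (r.1 : Int)) none with   -- line[top_level_indent:]
        | [] => c
        | e :: _ => if e == ' ' then c else c + 1) 0

-- ===== PORT B =====
-- loop body of B's single pass: state = (min_indent : Option Nat, count : Int)
def pvStepB (acc : Option Nat × Int) (line : List Char) : Option Nat × Int :=
  match PySem.Chars.strip line with
  | [] => acc                        -- not stripped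
  | c :: _ =>
    if c == '#' then acc             -- stripped[0] == "#"
    else
      let indent := line.length - (PySem.Chars.lstrip line).length
      match acc.1 with
      | none => (some indent, 1)     -- min_indent is None
      | some m =>
        if indent < m then (some indent, 1)
        else if indent == m then (some m, acc.2 + 1)
        else acc

def count_top_level_element_alt (yml_body : String) : Int :=
  let r := ((PySem.Str.splitlines yml_body).map String.toList).foldl pvStepB (none, 0)
  match r.1 with
  | none => -1
  | some _ => r.2

-- ===== PRECONDITION & SPEC =====
-- spec-side helpers (used by Pre_ / D_; they do not touch either port)
def pvValid (line : List Char) : Bool :=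
  (PySem.Chars.strip line).head?.any (fun c => c != '#')
def pvInd (line : List Char) : Nat := (line.takeWhile PySem.Chars.isspace).length

-- Pre_ excludes bodies whose every valid (non-empty, non-comment) line has more than 1024
-- leading whitespace characters: there A's hard-coded sentinel 1024 caps the computed
-- top-level indent below the real minimum and its count is an artefact of that sentinel.
def Pre_count_top_level_element (yml_body : String) : Prop :=
  (∃ l ∈ PySem.Chars.splitlines yml_body.toList, pvValid l = true) →
    ∃ l ∈ PySem.Chars.splitlines yml_body.toList, pvValid l = true ∧ pvInd l ≤ 1024
instance (yml_body : String) : Decidable (Pre_count_top_level_element yml_body) := by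
  unfold Pre_count_top_level_element; infer_instance

def pvWitness_count_top_level_element : String := "a: 1\n  b: 2\n# c"

-- On bodies where some valid line indented deeper than the minimum indent has a tab at the
-- minimum-indent column, A counts that deeper line as top-level too (its test only skips a
-- space there), while B counts only the lines at the minimum indent, which is the intended
-- count of top-level elements.
def D_count_top_level_element (yml_body : String) : Prop :=
  let vs := (PySem.Chars.splitlines yml_body.toList).filter pvValid
  (vs.any fun l => l.getD ((vs.map pvInd).min?.getD 0) ' ' == '\t') = true
instance (yml_body : String) : Decidable (D_count_top_level_element yml_body) := by
  unfold D_count_top_level_element; infer_instance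

def Spec_count_top_level_element (yml_body : String) (out : Int) : Prop :=
  ¬ D_count_top_level_element yml_body → out = count_top_level_element_alt yml_body
instance (yml_body : String) (out : Int) : Decidable (Spec_count_top_level_element yml_body out) := by
  unfold Spec_count_top_level_element; infer_instance

def pvDiffWitness_count_top_level_element : String := "a: 1\n\tb: 2"
def pvDiffWitnessOut_count_top_level_element : Int × Int := (2, 1)

-- ===== CLAIM (what is proved, stated in full; the proofs are below) =====
def Claim_unchanged_count_top_level_element : Prop := ∀ (yml_body : String), Dom_count_top_level_element yml_body → Pre_count_top_level_element yml_body → Spec_count_top_level_element yml_body (count_top_level_element yml_body)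
def Claim_changed_count_top_level_element : Prop := Dom_count_top_level_element (pvDiffWitness_count_top_level_element) ∧ Pre_count_top_level_element (pvDiffWitness_count_top_level_element) ∧ D_count_top_level_element (pvDiffWitness_count_top_level_element) ∧ count_top_level_element (pvDiffWitness_count_top_level_element) = pvDiffWitnessOut_count_top_level_element.1 ∧ count_top_level_element_alt (pvDiffWitness_count_top_level_element) = pvDiffWitnessOut_count_top_level_element.2 ∧ pvDiffWitnessOut_count_top_level_element.1 ≠ pvDiffWitnessOut_count_top_level_element.2
def Claim_exact_count_top_level_element : Prop := ∀ (yml_body : String), Dom_count_top_level_element yml_body → Pre_count_top_level_element yml_body → D_count_top_level_element yml_body → count_top_level_element yml_body ≠ count_top_level_element_alt yml_body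

-- ===== LEMMAS AND PROOFS =====

-- characters a line of a Dom-string can contain: tab or printable ASCII
def pvLineChar (c : Char) : Bool := c.toNat == 9 || (32 ≤ c.toNat && c.toNat ≤ 126)

-- bridges between the spec-side helpers and the expressions the ports compute
lemma pvValid_eq (l : List Char) :
    pvValid l = (match PySem.Chars.strip l with
      | [] => false
      | c :: _ => !(c == '#')) := by
  unfold pvValid
  cases h : PySem.Chars.strip l <;> simp [bne]

lemma pvInd_eq (l : List Char) :
    pvInd l = l.length - (PySem.Chars.lstrip l).length := by
  unfold pvInd PySem.Chars.lstrip
  have := congrArg List.length (List.takeWhile_append_dropWhile (p := PySem.Chars.isspace) (l := l))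
  simp only [List.length_append] at this
  omega

lemma pv_go_chars (isB : Char → Bool) (P : Char → Bool) (s cur : List Char) (acc : List (List Char))
    (hs : ∀ c ∈ s, isB c = false → P c = true)
    (hcur : ∀ c ∈ cur, P c = true)
    (hacc : ∀ m ∈ acc, ∀ c ∈ m, P c = true) :
    ∀ m ∈ PySem.Chars.splitlines.go isB s cur acc, ∀ c ∈ m, P c = true := by
  fun_induction PySem.Chars.splitlines.go isB s cur acc with
  | case1 cur acc h =>
      intro m hm; exact hacc _ (List.mem_reverse.mp hm)
  | case2 cur acc h =>
      intro m hm
      rcases List.mem_cons.mp (List.mem_reverse.mp hm) with h' | h'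
      · subst h'; exact fun c hc => hcur c (List.mem_reverse.mp hc)
      · exact hacc _ h'
  | case3 rest cur acc ih =>
      apply ih
      · intro c hc hb; exact hs c (by simp [hc]) hb
      · exact fun c hc => nomatch hc
      · intro m hm
        rcases List.mem_cons.mp hm with h' | h'
        · subst h'; exact fun c hc => hcur c (List.mem_reverse.mp hc)
        · exact hacc _ h'
  | case4 c rest cur acc hx hb ih =>
      apply ih
      · intro d hd hbd; exact hs d (by simp [hd]) hbd
      · exact fun d hd => nomatch hd
      · intro m hm
        rcases List.mem_cons.mp hm with h' | h'
        · subst h'; exact fun d hd => hcur d (List.mem_reverse.mp hd)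
        · exact hacc _ h'
  | case5 c rest cur acc hx hb ih =>
      apply ih
      · intro d hd hbd; exact hs d (by simp [hd]) hbd
      · intro d hd
        rcases List.mem_cons.mp hd with h' | h'
        · subst h'; exact hs _ (by simp) (by simpa using hb)
        · exact hcur d h'
      · exact hacc

lemma pv_splitlines_chars (s : String) (h : pvDomStr s = true) :
    ∀ l ∈ PySem.Chars.splitlines s.toList, ∀ c ∈ l, pvLineChar c = true := by
  unfold PySem.Chars.splitlines
  apply pv_go_chars
  · intro c hc hb
    have hd : pvDomChar c = true := by
      have := (List.all_eq_true.mp h) c hc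
      simpa using this
    simp only [pvDomChar, pvLineChar] at *
    simp only [Bool.or_eq_true, Bool.and_eq_true, decide_eq_true_eq, beq_iff_eq,
      Bool.or_eq_false_iff, decide_eq_false_iff_not] at hd hb ⊢
    omega
  · exact fun c hc => nomatch hc
  · exact fun m hm => nomatch hm

lemma pv_toNat_inj {c d : Char} (h : c.toNat = d.toNat) : c = d := by
  apply Char.ext; apply UInt32.toBitVec_inj.mp; apply BitVec.toNat_inj.mp; exact h

lemma pv_isspace_lineChar {c : Char} (h : pvLineChar c = true) :
    PySem.Chars.isspace c = (c == ' ' || c == '\t') := by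
  simp only [pvLineChar, Bool.or_eq_true, Bool.and_eq_true, decide_eq_true_eq, beq_iff_eq] at h
  by_cases h9 : c.toNat = 9
  · have hc : c = '\t' := pv_toNat_inj h9
    subst hc; decide
  · by_cases h32 : c.toNat = 32
    · have hc : c = ' ' := pv_toNat_inj h32
      subst hc; decide
    · have hne1 : (c == ' ') = false := by
        refine beq_eq_false_iff_ne.mpr ?_; intro hh; subst hh; exact h32 rfl
      have hne2 : (c == '\t') = false := by
        refine beq_eq_false_iff_ne.mpr ?_; intro hh; subst hh; exact h9 rfl
      rw [hne1, hne2]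
      have hns : ¬ PySem.Chars.isspace c = true := by
        intro ht
        simp only [PySem.Chars.isspace, Bool.or_eq_true, Bool.and_eq_true, decide_eq_true_eq] at ht
        omega
      simp [Bool.eq_false_iff.mpr hns]

-- basic facts about pvValid / pvInd
lemma pv_skip_eq (l : List Char) : pvIsSkipLine l = !pvValid l := by
  rw [pvValid_eq]
  unfold pvIsSkipLine
  cases h : PySem.Chars.strip l <;> simp

lemma pv_ind_eq_takeWhile (l : List Char) :
    pvInd l = (l.takeWhile PySem.Chars.isspace).length := rfl

lemma pv_valid_lstrip_ne {l : List Char} (hv : pvValid l = true) :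
    PySem.Chars.lstrip l ≠ [] := by
  intro hnil
  rw [pvValid_eq] at hv
  have : PySem.Chars.strip l = [] := by
    unfold PySem.Chars.strip
    rw [hnil]; rfl
  rw [this] at hv
  exact absurd hv (by simp)

lemma pv_drop_ind {l : List Char} :
    l.drop (pvInd l) = PySem.Chars.lstrip l := by
  rw [pv_ind_eq_takeWhile]
  unfold PySem.Chars.lstrip
  have h := List.drop_left' (l₁ := l.takeWhile PySem.Chars.isspace)
    (l₂ := l.dropWhile PySem.Chars.isspace) (i := (l.takeWhile PySem.Chars.isspace).length) rfl
  rw [List.takeWhile_append_dropWhile] at h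
  exact h

lemma pv_ind_lt_len {l : List Char} (hv : pvValid l = true) : pvInd l < l.length := by
  have h1 := pv_valid_lstrip_ne hv
  have h2 : (PySem.Chars.lstrip l).length ≤ l.length := by
    unfold PySem.Chars.lstrip; exact List.length_dropWhile_le _ _
  have h3 : 0 < (PySem.Chars.lstrip l).length := List.length_pos_iff.mpr h1
  rw [pvInd_eq]
  omega

-- the character at the minimum indent decides A's count; these two lemmas pin it down
lemma pv_getElem_ind {l : List Char} (hv : pvValid l = true)
    (hch : ∀ c ∈ l, pvLineChar c = true) :
    (l[pvInd l]'(pv_ind_lt_len hv) == ' ') = false ∧ (l[pvInd l]'(pv_ind_lt_len hv) == '\t') = false := by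
  have hne := pv_valid_lstrip_ne hv
  have hlt := pv_ind_lt_len hv
  have hd : l.drop (pvInd l) = PySem.Chars.lstrip l := pv_drop_ind
  have hcons : l.drop (pvInd l) = l[pvInd l]'hlt :: l.drop (pvInd l + 1) :=
    List.drop_eq_getElem_cons hlt
  have hhead : PySem.Chars.isspace ((PySem.Chars.lstrip l).head hne) = false := by
    unfold PySem.Chars.lstrip at *
    exact List.head_dropWhile_not _ hne
  have hsome : (PySem.Chars.lstrip l).head? = some (l[pvInd l]'hlt) := by
    rw [← hd, hcons]; rfl
  have hheadeq : (PySem.Chars.lstrip l).head hne = l[pvInd l]'hlt := by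
    have := List.head?_eq_some_head (l := PySem.Chars.lstrip l) hne
    rw [this] at hsome
    exact Option.some.inj hsome
  rw [hheadeq] at hhead
  have hchar : pvLineChar (l[pvInd l]'hlt) = true := hch _ (List.getElem_mem hlt)
  rw [pv_isspace_lineChar hchar] at hhead
  exact ⟨(Bool.or_eq_false_iff.mp hhead).1, (Bool.or_eq_false_iff.mp hhead).2⟩

lemma pv_getElem_lt_ind {l : List Char} {p : Nat} (hp : p < pvInd l)
    (hch : ∀ c ∈ l, pvLineChar c = true) (hlen : p < l.length) :
    ((l[p]'hlen) == ' ') = true ∨ ((l[p]'hlen) == '\t') = true := by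
  have htw : p < (l.takeWhile PySem.Chars.isspace).length := by
    rw [← pv_ind_eq_takeWhile]; exact hp
  have hpre := List.takeWhile_prefix (l := l) (PySem.Chars.isspace)
  have hget : (l.takeWhile PySem.Chars.isspace)[p]'htw = l[p]'hlen := hpre.getElem htw
  have hsp : PySem.Chars.isspace ((l.takeWhile PySem.Chars.isspace)[p]'htw) = true :=
    List.mem_takeWhile_imp (List.getElem_mem htw)
  rw [hget] at hsp
  have hchar : pvLineChar (l[p]'hlen) = true := hch _ (List.getElem_mem hlen)
  rw [pv_isspace_lineChar hchar] at hsp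
  simpa using hsp

-- fold-min facts (for A's first loop)
lemma pv_foldl_min_le_init (ns : List Nat) (a : Nat) : ns.foldl min a ≤ a := by
  induction ns generalizing a with
  | nil => simp
  | cons n t ih => simpa using le_trans (ih (min a n)) (min_le_left a n)

lemma pv_foldl_min_le_mem (ns : List Nat) (a : Nat) : ∀ n ∈ ns, ns.foldl min a ≤ n := by
  induction ns generalizing a with
  | nil => simp
  | cons m t ih =>
      intro n hn
      rcases List.mem_cons.mp hn with h | h
      · subst h
        exact le_trans (pv_foldl_min_le_init t (min a n)) (min_le_right a n)
      · exact ih (min a m) n h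

lemma pv_foldl_min_mem_or (ns : List Nat) (a : Nat) :
    ns.foldl min a = a ∨ ns.foldl min a ∈ ns := by
  induction ns generalizing a with
  | nil => simp
  | cons m t ih =>
      rcases ih (min a m) with h | h
      · simp only [List.foldl_cons]
        rcases Nat.le_total a m with hle | hle
        · left; rw [h, Nat.min_eq_left hle]
        · right; rw [h, Nat.min_eq_right hle]; exact List.mem_cons_self
      · right; exact List.mem_cons_of_mem m h

-- counting helpers
lemma pv_countP_or_disjoint {α : Type} (l : List α) (p q : α → Bool)
    (h : ∀ x ∈ l, ¬(p x = true ∧ q x = true)) :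
    l.countP (fun x => p x || q x) = l.countP p + l.countP q := by
  induction l with
  | nil => simp
  | cons x t ih =>
      have ht := ih (fun y hy => h y (List.mem_cons_of_mem x hy))
      by_cases hp : p x = true
      · have hq : q x = false := by
          rcases Bool.eq_false_or_eq_true (q x) with h' | h'
          · exact absurd ⟨hp, h'⟩ (h x List.mem_cons_self)
          · exact h'
        simp [List.countP_cons, hp, hq, ht]; omega
      · simp only [Bool.not_eq_true] at hp
        simp [List.countP_cons, hp, ht]
        by_cases hq : q x = true <;> simp [hq] <;> omega

-- A's per-line counting test (guard and character test, as the second loop computes it)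
def pvCondA (M : Nat) (l : List Char) : Bool :=
  pvValid l &&
    (if l.length < M then false
     else match PySem.List.slice l (some (M : Int)) none with
       | [] => false
       | e :: _ => !(e == ' '))

-- B's tab condition at the minimal column M
def pvTabC (M : Nat) (l : List Char) : Bool :=
  decide (M < pvInd l) && (l.getD M ' ' == '\t')

lemma pv_foldA1 (lines : List (List Char)) (a : Nat) (b : Bool) :
    lines.foldl (fun (acc : Nat × Bool) line =>
      if pvIsSkipLine line then acc
      else
        let indent := line.length - (PySem.Chars.lstrip line).length
        (if indent < acc.1 then indent else acc.1, true)) (a, b)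
    = (((lines.filter (fun l => pvValid l)).map pvInd).foldl min a,
       b || lines.any (fun l => pvValid l)) := by
  induction lines generalizing a b with
  | nil => simp
  | cons l t ih =>
      rw [List.foldl_cons, List.filter_cons, List.any_cons]
      cases hv : pvValid l with
      | false =>
          have hs : pvIsSkipLine l = true := by rw [pv_skip_eq, hv]; rfl
          simp only [hs, if_true]
          rw [ih]
          simp [hv]
      | true =>
          have hs : pvIsSkipLine l = false := by rw [pv_skip_eq, hv]; rfl
          have hmin : (if l.length - (PySem.Chars.lstrip l).length < a
              then l.length - (PySem.Chars.lstrip l).length else a) = min a (pvInd l) := by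
            rw [pvInd_eq]
            rcases Nat.lt_or_ge (l.length - (PySem.Chars.lstrip l).length) a with h | h
            · rw [if_pos h, Nat.min_eq_right (Nat.le_of_lt h)]
            · rw [if_neg (by omega), Nat.min_eq_left h]
          simp only [hs, Bool.false_eq_true, if_false]
          rw [ih]
          simp [hv, hmin]

lemma pv_foldA2 (lines : List (List Char)) (M : Nat) (c : Int) :
    lines.foldl (fun (c : Int) line =>
      if pvIsSkipLine line then c
      else if line.length < M then c
      else
        match PySem.List.slice line (some (M : Int)) none with
        | [] => c
        | e :: _ => if e == ' ' then c else c + 1) c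
    = c + ((lines.countP (fun l => pvCondA M l) : Nat) : Int) := by
  have hstep : (fun (c : Int) line =>
      if pvIsSkipLine line then c
      else if line.length < M then c
      else
        match PySem.List.slice line (some (M : Int)) none with
        | [] => c
        | e :: _ => if e == ' ' then c else c + 1)
      = (fun (c : Int) line => if pvCondA M line then c + 1 else c) := by
    funext c line
    unfold pvCondA
    rw [pv_skip_eq]
    cases hv : pvValid line with
    | false => simp [hv]
    | true =>
        simp only [hv, Bool.not_true, if_false, Bool.true_and]
        by_cases hlen : line.length < M
        · simp [hlen]
        · simp only [hlen, if_false]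
          rcases hsl : PySem.List.slice line (some (M : Int)) none with _ | ⟨e, rest⟩
          · simp
          · by_cases he : (e == ' ') = true <;> simp [he]
  rw [hstep, PySem.List.foldl_if_add_one]

-- B's fold skips exactly the non-valid lines and only looks at each valid line's indent
def pvStep' (acc : Option Nat × Int) (ind : Nat) : Option Nat × Int :=
  match acc.1 with
  | none => (some ind, 1)
  | some m =>
    if ind < m then (some ind, 1)
    else if ind == m then (some m, acc.2 + 1)
    else acc

lemma pv_foldB_filter (lines : List (List Char)) (acc : Option Nat × Int) :
    lines.foldl pvStepB acc
      = ((lines.filter (fun l => pvValid l)).map pvInd).foldl pvStep' acc := by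
  induction lines generalizing acc with
  | nil => simp
  | cons l t ih =>
      rw [List.foldl_cons, List.filter_cons]
      have hval : pvValid l = (match PySem.Chars.strip l with
        | [] => false
        | c :: _ => !(c == '#')) := pvValid_eq l
      have hstep : pvStepB acc l = (if pvValid l then pvStep' acc (pvInd l) else acc) := by
        rw [pvInd_eq]
        unfold pvStepB pvStep'
        rcases hst : PySem.Chars.strip l with _ | ⟨c, rest⟩
        · have hv : pvValid l = false := by rw [hval, hst]
          simp [hv]
        · by_cases hc : (c == '#') = true
          · have hv : pvValid l = false := by rw [hval, hst]; simp [hc]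
            simp [hc, hv]
          · have hv : pvValid l = true := by rw [hval, hst]; simp [hc]
            simp [hc, hv]
      cases hv : pvValid l with
      | false => rw [hstep, hv]; simp; exact ih acc
      | true => rw [hstep, hv]; simp only [if_true, List.map_cons, List.foldl_cons]; exact ih _

lemma pv_step'_min (ns : List Nat) (m : Nat) (c : Int) :
    ns.foldl pvStep' (some m, c)
      = (some (ns.foldl min m),
         if ns.foldl min m = m then c + ((ns.count m : Nat) : Int)
         else ((ns.count (ns.foldl min m) : Nat) : Int)) := by
  induction ns generalizing m c with
  | nil => simp
  | cons i t ih =>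
      have hle : t.foldl min (min m i) ≤ min m i := pv_foldl_min_le_init t (min m i)
      rw [List.foldl_cons]
      by_cases hlt : i < m
      · have hstep : pvStep' (some m, c) i = (some i, 1) := by
          unfold pvStep'; simp [hlt]
        rw [hstep, ih]
        have hmin : min m i = i := by omega
        simp only [List.foldl_cons, hmin]
        by_cases he : t.foldl min i = i
        · rw [if_pos he, if_neg (by omega), he, List.count_cons_self]
          push_cast; ring
        · have hne : t.foldl min i ≠ m := by
            have := pv_foldl_min_le_init t i; omega
          rw [if_neg he, if_neg hne, List.count_cons_of_ne (by omega)]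
      · by_cases heq : i = m
        · subst heq
          have hstep : pvStep' (some i, c) i = (some i, c + 1) := by
            unfold pvStep'; simp
          rw [hstep, ih]
          have hmin : min i i = i := by omega
          simp only [List.foldl_cons, hmin]
          by_cases he : t.foldl min i = i
          · rw [if_pos he, if_pos he, List.count_cons_self]
            push_cast; ring
          · rw [if_neg he, if_neg he, List.count_cons_of_ne (by omega)]
        · have hgt : m < i := by omega
          have hstep : pvStep' (some m, c) i = (some m, c) := by
            unfold pvStep'; simp [hlt, heq]
          rw [hstep, ih]
          have hmin : min m i = m := by omega
          have hlei := pv_foldl_min_le_init t m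
          simp only [List.foldl_cons, hmin]
          by_cases he : t.foldl min m = m
          · rw [if_pos he, if_pos he, List.count_cons_of_ne (by omega)]
          · rw [if_neg he, if_neg he, List.count_cons_of_ne (by omega)]

-- ===== the central computations: both ports on a body with valid lines v :: t =====

-- shared abbreviation: the true minimum indent when the valid lines are v :: t
def pvMB (v : List Char) (t : List (List Char)) : Nat := (t.map pvInd).foldl min (pvInd v)

lemma pv_charCond (M : Nat) (l : List Char) (hv : pvValid l = true)
    (hch : ∀ c ∈ l, pvLineChar c = true) (hM : M ≤ pvInd l) :
    pvCondA M l = ((pvInd l == M) || pvTabC M l) := by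
  have hlt : M < l.length := lt_of_le_of_lt hM (pv_ind_lt_len hv)
  have hlen : ¬ l.length < M := by omega
  have hslice : PySem.List.slice l (some (M : Int)) none = l.drop M := by
    rw [PySem.List.slice_from l (by exact_mod_cast Nat.zero_le M)]
    simp
  have hdrop : l.drop M = l[M]'hlt :: l.drop (M + 1) := List.drop_eq_getElem_cons hlt
  have hgetD : l.getD M ' ' = l[M]'hlt := List.getD_eq_getElem l ' ' hlt
  unfold pvCondA pvTabC
  rw [hv, Bool.true_and, if_neg hlen, hslice, hdrop, hgetD]
  rcases Nat.eq_or_lt_of_le hM with hEq | hLt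
  · subst hEq
    have hsp := pv_getElem_ind hv hch
    simp [hsp.1]
  · have h1 : (pvInd l == M) = false := by simp; omega
    have h2 : decide (M < pvInd l) = true := by simpa using hLt
    have hor := pv_getElem_lt_ind hLt hch hlt
    rw [h1, h2]
    by_cases hsp : (l[M]'hlt == ' ') = true
    · have he : l[M]'hlt = ' ' := by simpa using hsp
      have ht : (l[M]'hlt == '\t') = false := by rw [he]; decide
      simp [hsp, ht]
    · have ht : (l[M]'hlt == '\t') = true := by
        rcases hor with h | h
        · exact absurd h hsp
        · exact h
      simp only [Bool.not_eq_true] at hsp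
      simp [hsp, ht]

lemma pv_minInd_some (y : String) (v : List Char) (t : List (List Char))
    (hvs : (PySem.Chars.splitlines y.toList).filter (fun l => pvValid l) = v :: t) :
    (((PySem.Chars.splitlines y.toList).filter pvValid).map pvInd).min?
      = some (pvMB v t) := by
  unfold pvMB
  have hvs' : (PySem.Chars.splitlines y.toList).filter pvValid = v :: t := hvs
  rw [hvs', List.map_cons, List.min?_cons']

-- the character at a valid line's own indent is its first non-whitespace character, never a tab
lemma pv_getD_ind_ne_tab (l : List Char) (hv : pvValid l = true) :
    l.getD (pvInd l) ' ' ≠ '\t' := by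
  have hne := pv_valid_lstrip_ne hv
  have hlt := pv_ind_lt_len hv
  have hd : l.drop (pvInd l) = PySem.Chars.lstrip l := pv_drop_ind
  have hcons : l.drop (pvInd l) = l[pvInd l]'hlt :: l.drop (pvInd l + 1) :=
    List.drop_eq_getElem_cons hlt
  have hhead : PySem.Chars.isspace ((PySem.Chars.lstrip l).head hne) = false := by
    unfold PySem.Chars.lstrip at *
    exact List.head_dropWhile_not _ hne
  have hsome : (PySem.Chars.lstrip l).head? = some (l[pvInd l]'hlt) := by
    rw [← hd, hcons]; rfl
  have hheadeq : (PySem.Chars.lstrip l).head hne = l[pvInd l]'hlt := by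
    have := List.head?_eq_some_head (l := PySem.Chars.lstrip l) hne
    rw [this] at hsome
    exact Option.some.inj hsome
  rw [List.getD_eq_getElem l ' ' hlt, ← hheadeq]
  intro h
  rw [h] at hhead
  exact absurd hhead (by decide)

lemma pv_A_eq (y : String) (v : List Char) (t : List (List Char))
    (hdom : pvDomStr y = true)
    (hpre : Pre_count_top_level_element y)
    (hvs : (PySem.Chars.splitlines y.toList).filter (fun l => pvValid l) = v :: t) :
    count_top_level_element y
      = (((v :: t).countP (fun l => pvInd l == pvMB v t) : Nat) : Int)
        + (((v :: t).countP (pvTabC (pvMB v t)) : Nat) : Int) := by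
  have hch : ∀ l ∈ PySem.Chars.splitlines y.toList, ∀ c ∈ l, pvLineChar c = true :=
    pv_splitlines_chars y hdom
  unfold count_top_level_element
  simp only [PySem.Str.splitlines_map_toList, pv_foldA1]
  have hvf : v ∈ (PySem.Chars.splitlines y.toList).filter (fun l => pvValid l) := by
    rw [hvs]; exact List.mem_cons_self
  have hvv : pvValid v = true := by simpa using (List.mem_filter.mp hvf).2
  have hvl : v ∈ PySem.Chars.splitlines y.toList := (List.mem_filter.mp hvf).1
  have hany : (PySem.Chars.splitlines y.toList).any (fun l => pvValid l) = true :=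
    List.any_eq_true.mpr ⟨v, hvl, hvv⟩
  obtain ⟨l0, hl0mem, hl0v, hl0le⟩ := hpre ⟨v, hvl, hvv⟩
  rw [hvs, hany]
  rw [pv_foldA2 _ _ 0]
  set inds : List Nat := (v :: t).map pvInd with hinds
  set MA : Nat := inds.foldl min 1024 with hMA
  have hMBv : pvMB v t = inds.foldl min (pvInd v) := by
    unfold pvMB
    rw [hinds, List.map_cons, List.foldl_cons]
    simp
  -- the sentinel minimum MA equals the true minimum pvMB v t
  have hA_le : ∀ n ∈ inds, MA ≤ n := pv_foldl_min_le_mem inds 1024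
  have hB_le : ∀ n ∈ inds, pvMB v t ≤ n := by
    rw [hMBv]; exact pv_foldl_min_le_mem inds (pvInd v)
  have hB_mem : pvMB v t ∈ inds := by
    rw [hMBv]
    rcases pv_foldl_min_mem_or inds (pvInd v) with h | h
    · rw [h, hinds, List.map_cons]; exact List.mem_cons_self
    · exact h
  have hl0f : l0 ∈ (PySem.Chars.splitlines y.toList).filter (fun l => pvValid l) :=
    List.mem_filter.mpr ⟨hl0mem, by simpa using hl0v⟩
  have hl0ind : pvInd l0 ∈ inds := by
    rw [hinds, ← hvs]
    exact List.mem_map_of_mem hl0f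
  have hMA_mem : MA ∈ inds := by
    rcases pv_foldl_min_mem_or inds 1024 with h | h
    · have h1 : MA ≤ pvInd l0 := hA_le _ hl0ind
      have h2 : pvInd l0 = MA := by omega
      rw [← h2]; exact hl0ind
    · exact h
  have hMM : MA = pvMB v t := Nat.le_antisymm (hA_le _ hB_mem) (hB_le _ hMA_mem)
  -- rewrite A's counting condition and split it
  have h2 : ∀ l ∈ v :: t, pvCondA MA l = ((pvInd l == pvMB v t) || pvTabC (pvMB v t) l) := by
    intro l hl
    have hlf : l ∈ (PySem.Chars.splitlines y.toList).filter (fun l => pvValid l) := by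
      rw [hvs]; exact hl
    have hlv : pvValid l = true := by simpa using (List.mem_filter.mp hlf).2
    have hlmem : l ∈ PySem.Chars.splitlines y.toList := (List.mem_filter.mp hlf).1
    have hindmem : pvInd l ∈ inds := by
      rw [hinds, ← hvs]; exact List.mem_map_of_mem hlf
    rw [hMM]
    exact pv_charCond (pvMB v t) l hlv (hch l hlmem) (hB_le _ hindmem)
  have hcnt : (v :: t).countP (fun l => pvCondA MA l)
      = (v :: t).countP (fun l => pvInd l == pvMB v t) + (v :: t).countP (pvTabC (pvMB v t)) := by
    rw [List.countP_congr (fun x hx => by rw [h2 x hx])]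
    refine pv_countP_or_disjoint _ _ _ ?_
    intro l hl ⟨h1', h2'⟩
    have he : pvInd l = pvMB v t := by simpa using h1'
    have hlt : pvMB v t < pvInd l := by
      unfold pvTabC at h2'
      simp only [Bool.and_eq_true, decide_eq_true_eq] at h2'
      exact h2'.1
    omega
  have h1 : (PySem.Chars.splitlines y.toList).countP (fun l => pvCondA MA l)
      = (v :: t).countP (fun l => pvCondA MA l) := by
    rw [← hvs, List.countP_filter]
    refine List.countP_congr ?_
    intro l hl
    unfold pvCondA
    cases hvt : pvValid l <;> simp [hvt]
  rw [if_neg (by simp), h1, hcnt]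
  push_cast
  ring

lemma pv_B_eq (y : String) (v : List Char) (t : List (List Char))
    (hvs : (PySem.Chars.splitlines y.toList).filter (fun l => pvValid l) = v :: t) :
    count_top_level_element_alt y
      = (((v :: t).countP (fun l => pvInd l == pvMB v t) : Nat) : Int) := by
  unfold count_top_level_element_alt
  simp only [PySem.Str.splitlines_map_toList]
  rw [pv_foldB_filter, hvs, List.map_cons, List.foldl_cons]
  have hstep : pvStep' (none, 0) (pvInd v) = (some (pvInd v), 1) := by
    unfold pvStep'; simp
  rw [hstep, pv_step'_min]
  have hMBv : pvMB v t = (t.map pvInd).foldl min (pvInd v) := rfl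
  have hcnt : (v :: t).countP (fun l => pvInd l == pvMB v t)
      = ((v :: t).map pvInd).count (pvMB v t) := by
    rw [List.count, List.countP_map]
    rfl
  rw [hcnt, List.map_cons, List.count_cons, hMBv]
  by_cases he : (t.map pvInd).foldl min (pvInd v) = pvInd v
  · rw [if_pos he, he]
    simp only [beq_self_eq_true, if_true]
    omega
  · rw [if_neg he]
    have hne : (pvInd v == (t.map pvInd).foldl min (pvInd v)) = false := by
      simp only [beq_eq_false_iff_ne, ne_eq]
      exact fun h => he h.symm
    rw [hne]
    simp

lemma pv_empty (y : String)
    (hvs : (PySem.Chars.splitlines y.toList).filter (fun l => pvValid l) = []) :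
    count_top_level_element y = -1 ∧ count_top_level_element_alt y = -1 := by
  have hany : (PySem.Chars.splitlines y.toList).any (fun l => pvValid l) = false := by
    rw [List.any_eq_false]
    intro l hl
    simp [List.filter_eq_nil_iff.mp hvs l hl]
  constructor
  · unfold count_top_level_element
    simp only [PySem.Str.splitlines_map_toList, pv_foldA1, hany]
    simp
  · unfold count_top_level_element_alt
    simp only [PySem.Str.splitlines_map_toList]
    rw [pv_foldB_filter, hvs]
    simp

lemma pv_D_iff (y : String) (v : List Char) (t : List (List Char))
    (hvs : (PySem.Chars.splitlines y.toList).filter (fun l => pvValid l) = v :: t) :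
    D_count_top_level_element y ↔ 0 < (v :: t).countP (pvTabC (pvMB v t)) := by
  have hvs' : (PySem.Chars.splitlines y.toList).filter pvValid = v :: t := hvs
  have hm : (((PySem.Chars.splitlines y.toList).filter pvValid).map pvInd).min?.getD 0
      = pvMB v t := by
    rw [pv_minInd_some y v t hvs]; rfl
  unfold D_count_top_level_element
  simp only [hm]
  simp only [hvs']
  rw [List.any_eq_true, List.countP_pos_iff]
  have hmemv : ∀ l ∈ v :: t, pvValid l = true ∧ pvMB v t ≤ pvInd l := by
    intro l hl
    have hlf : l ∈ (PySem.Chars.splitlines y.toList).filter (fun l => pvValid l) := by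
      rw [hvs]; exact hl
    have hlv : pvValid l = true := by simpa using (List.mem_filter.mp hlf).2
    refine ⟨hlv, ?_⟩
    have hmem : pvInd l ∈ (v :: t).map pvInd := List.mem_map_of_mem hl
    rw [List.map_cons] at hmem
    unfold pvMB
    rcases List.mem_cons.mp hmem with h | h
    · rw [h]; exact pv_foldl_min_le_init _ _
    · exact pv_foldl_min_le_mem _ _ _ h
  constructor
  · rintro ⟨l, hl, hcond⟩
    obtain ⟨hlv, hle⟩ := hmemv l hl
    have htab : l.getD (pvMB v t) ' ' = '\t' := by simpa using hcond
    refine ⟨l, hl, ?_⟩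
    unfold pvTabC
    have hne : pvMB v t ≠ pvInd l := by
      intro h
      exact pv_getD_ind_ne_tab l hlv (by rw [← h]; exact htab)
    simp only [Bool.and_eq_true, decide_eq_true_eq, beq_iff_eq]
    exact ⟨by omega, htab⟩
  · rintro ⟨l, hl, hcond⟩
    unfold pvTabC at hcond
    simp only [Bool.and_eq_true, decide_eq_true_eq, beq_iff_eq] at hcond
    exact ⟨l, hl, by simpa using hcond.2⟩

-- ===== VERDICT (by name: the statements are the Claim_ definitions above) =====
theorem count_top_level_element_spec : Claim_unchanged_count_top_level_element := by
  intro y hdom hpre hnd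
  rcases hvs : (PySem.Chars.splitlines y.toList).filter (fun l => pvValid l) with _ | ⟨v, t⟩
  · obtain ⟨hA, hB⟩ := pv_empty y hvs
    rw [hA, hB]
  · rw [pv_A_eq y v t hdom hpre hvs, pv_B_eq y v t hvs]
    have hz : (v :: t).countP (pvTabC (pvMB v t)) = 0 := by
      by_contra h
      exact hnd ((pv_D_iff y v t hvs).mpr (Nat.pos_of_ne_zero h))
    rw [hz]
    omega

theorem count_top_level_element_changed : Claim_changed_count_top_level_element := by
  unfold Claim_changed_count_top_level_element; decide

theorem count_top_level_element_tight : Claim_exact_count_top_level_element := by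
  intro y hdom hpre hd
  rcases hvs : (PySem.Chars.splitlines y.toList).filter (fun l => pvValid l) with _ | ⟨v, t⟩
  · exfalso
    unfold D_count_top_level_element at hd
    rw [hvs] at hd
    simp at hd
  · rw [pv_A_eq y v t hdom hpre hvs, pv_B_eq y v t hvs]
    have hpos : 0 < (v :: t).countP (pvTabC (pvMB v t)) := (pv_D_iff y v t hvs).mp hd
    intro h
    omega
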